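-- pv_equiv track=rewrite | github.com/dodoyeon/SW_Academy | Programmers/weird_word.py | solution
-- ===== SOURCE A (Python) =====
-- def solution(s):
--     answer = ''
--     num = 0
--     for c in s:
--         val = ord(c)
--         if (65<=val<=90)or(97<=val<=122):
--             if num%2 == 0:
--                 if val >= 97:
--                     answer += chr(val-32)
--                 else:
--                     answer += c
--             else:
--                 if val >= 97:
--                     answer += c
--                 else:
--                     answer += chr(val+32)
--             num += 1
--         else:
--             answer += c
--             num = 0
--     return answer
-- ===== SOURCE B (Python) =====
-- def _is_letter(c):
--     return 'A' <= c <= 'Z' or 'a' <= c <= 'z'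
--
--
-- def solution(s):
--     # Tokenize s into maximal runs of letters / non-letters, transform
--     # each letter run by alternating upper/lower starting at 0, join.
--     tokens = []
--     i = 0
--     n = len(s)
--     while i < n:
--         j = i
--         letter = _is_letter(s[i])
--         while j < n and _is_letter(s[j]) == letter:
--             j += 1
--         run = s[i:j]
--         if letter:
--             run = ''.join(ch.upper() if k % 2 == 0 else ch.lower()
--                           for k, ch in enumerate(run))
--         tokens.append(run)
--         i = j
--     return ''.join(tokens)
-- ===== Notes on version B (the rewrite author's own statement) =====
-- stated objective: idiomatic
-- what changed: Replaces the single character loop with a mod-2 counter that resets on non-letters by a two-level tokenize-then-transform pass: split into maximal letter/non-letter runs, alternate case within each letter run by index, join the tokens.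
import Mathlib
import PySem

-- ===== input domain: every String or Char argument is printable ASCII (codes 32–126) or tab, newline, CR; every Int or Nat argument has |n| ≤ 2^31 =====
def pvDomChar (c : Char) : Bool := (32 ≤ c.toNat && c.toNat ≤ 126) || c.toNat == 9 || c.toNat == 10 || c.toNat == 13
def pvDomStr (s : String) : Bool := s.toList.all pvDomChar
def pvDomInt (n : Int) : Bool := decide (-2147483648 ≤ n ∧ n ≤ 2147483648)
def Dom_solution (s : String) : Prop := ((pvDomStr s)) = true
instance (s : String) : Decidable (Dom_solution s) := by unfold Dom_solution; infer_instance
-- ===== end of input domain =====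

-- B tokenizes the string into maximal letter / non-letter runs and alternates case
-- inside each letter run by index (more idiomatic two-level decomposition); return value only.


-- ===== PORT A =====
-- one loop step of A's for-loop (state = (answer, num))
def pvAStep (st : String × Int) (c : Char) : String × Int :=
  let answer := st.1
  let num := st.2
  let val : Int := (c.toNat : Int)
  if (65 ≤ val ∧ val ≤ 90) ∨ (97 ≤ val ∧ val ≤ 122) then
    if PySem.Int.mod num 2 = 0 then
      if val ≥ 97 then (answer.push (Char.ofNat (val - 32).toNat), num + 1)
      else (answer.push c, num + 1)
    else
      if val ≥ 97 then (answer.push c, num + 1)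
      else (answer.push (Char.ofNat (val + 32).toNat), num + 1)
  else (answer.push c, (0 : Int))

def solution (s : String) : String :=
  (s.toList.foldl pvAStep ("", (0 : Int))).1

-- ===== PORT B =====
def pvIsLetter (c : Char) : Bool :=
  (65 ≤ c.toNat && c.toNat ≤ 90) || (97 ≤ c.toNat && c.toNat ≤ 122)

-- ch.upper() / ch.lower() for a single char (exact on the ASCII domain)
def pvChUpper (c : Char) : Char :=
  if 97 ≤ c.toNat && c.toNat ≤ 122 then Char.ofNat (c.toNat - 32) else c
def pvChLower (c : Char) : Char :=
  if 65 ≤ c.toNat && c.toNat ≤ 90 then Char.ofNat (c.toNat + 32) else c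

-- ''.join(ch.upper() if k % 2 == 0 else ch.lower() for k, ch in enumerate(run))
def pvTransformRun (run : List Char) : List Char :=
  (PySem.List.enumerate run).map
    (fun p => if PySem.Int.mod p.1 2 = 0 then pvChUpper p.2 else pvChLower p.2)

-- the outer while-loop: cut off the maximal run starting at the head, transform letter runs
def pvTokens : List Char → List (List Char)
  | [] => []
  | c :: rest =>
    let isL := pvIsLetter c
    let run := List.takeWhile (fun x => pvIsLetter x == isL) (c :: rest)
    let rest' := List.dropWhile (fun x => pvIsLetter x == isL) (c :: rest)
    (if isL then pvTransformRun run else run) :: pvTokens rest'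
termination_by l => l.length
decreasing_by
  simp only [List.dropWhile_cons, beq_self_eq_true, if_true, List.length_cons]
  exact Nat.lt_succ_of_le (List.length_dropWhile_le _ _)

def solution_alt (s : String) : String :=
  String.ofList (pvTokens s.toList).flatten

-- ===== PRECONDITION & SPEC =====
def Spec_solution (s : String) (out : String) : Prop := out = solution_alt s
instance (s : String) (out : String) : Decidable (Spec_solution s out) := by unfold Spec_solution; infer_instance

-- ===== CLAIM (what is proved, stated in full; the proofs are below) =====
def Claim_equal_solution : Prop := ∀ (s : String), Dom_solution s → Spec_solution s (solution s)

-- ===== LEMMAS AND PROOFS =====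

-- list-level rendering of A's loop
def pvAList : List Char → Int → List Char
  | [], _ => []
  | c :: t, num =>
    let val : Int := (c.toNat : Int)
    if (65 ≤ val ∧ val ≤ 90) ∨ (97 ≤ val ∧ val ≤ 122) then
      (if PySem.Int.mod num 2 = 0
        then (if val ≥ 97 then Char.ofNat (val - 32).toNat else c)
        else (if val ≥ 97 then c else Char.ofNat (val + 32).toNat)) :: pvAList t (num + 1)
    else c :: pvAList t 0

theorem pv_foldA (l : List Char) (acc : String) (num : Int) :
    ((l.foldl pvAStep (acc, num)).1).toList = acc.toList ++ pvAList l num := by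
  induction l generalizing acc num with
  | nil => simp [pvAList]
  | cons c t ih =>
    simp only [List.foldl_cons, pvAStep, pvAList]
    split_ifs <;> simp [ih]

-- index-free alternating transform
def pvAlt : Nat → List Char → List Char
  | _, [] => []
  | n, c :: t => (if n % 2 = 0 then pvChUpper c else pvChLower c) :: pvAlt (n + 1) t

theorem pv_mod_cast (n : Nat) : PySem.Int.mod (n : Int) 2 = 0 ↔ n % 2 = 0 := by
  rw [PySem.Int.mod_eq_emod_of_pos (by norm_num)]
  omega

theorem pv_transform_eq_alt_aux (q : List Char) (n : Nat) :
    (PySem.List.enumerate q (n : Int)).map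
      (fun p => if PySem.Int.mod p.1 2 = 0 then pvChUpper p.2 else pvChLower p.2) = pvAlt n q := by
  induction q generalizing n with
  | nil => simp [PySem.List.enumerate_nil, pvAlt]
  | cons c t ih =>
    rw [PySem.List.enumerate_cons]
    have h1 : ((n : Int) + 1) = ((n + 1 : Nat) : Int) := by push_cast; ring
    simp only [List.map_cons, h1, ih, pvAlt]
    by_cases h : n % 2 = 0
    · rw [if_pos ((pv_mod_cast n).mpr h), if_pos h]
    · rw [if_neg (fun hc => h ((pv_mod_cast n).mp hc)), if_neg h]

theorem pv_transform_eq_alt (q : List Char) : pvTransformRun q = pvAlt 0 q := by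
  have := pv_transform_eq_alt_aux q 0
  simpa [pvTransformRun] using this

theorem pv_letter_iff (c : Char) :
    pvIsLetter c = true ↔
      ((65 ≤ ((c.toNat : Int)) ∧ ((c.toNat : Int)) ≤ 90) ∨
       (97 ≤ ((c.toNat : Int)) ∧ ((c.toNat : Int)) ≤ 122)) := by
  simp only [pvIsLetter, Bool.or_eq_true, Bool.and_eq_true, decide_eq_true_eq]
  omega

-- A's emitted char on a letter at an even position is ch.upper()
theorem pv_upper_eq (c : Char) (h : pvIsLetter c = true) :
    (if ((c.toNat : Int)) ≥ 97 then Char.ofNat (((c.toNat : Int)) - 32).toNat else c)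
      = pvChUpper c := by
  have hl := (pv_letter_iff c).mp h
  unfold pvChUpper
  split_ifs with h1 h2 h2 <;> first
    | rfl
    | (congr 1; omega)
    | (exfalso; simp only [Bool.and_eq_true, decide_eq_true_eq] at h2; omega)

theorem pv_lower_eq (c : Char) (h : pvIsLetter c = true) :
    (if ((c.toNat : Int)) ≥ 97 then c else Char.ofNat (((c.toNat : Int)) + 32).toNat)
      = pvChLower c := by
  have hl := (pv_letter_iff c).mp h
  unfold pvChLower
  split_ifs with h1 h2 h2 <;> first
    | rfl
    | (congr 1; omega)
    | (exfalso; simp only [Bool.and_eq_true, decide_eq_true_eq] at h2; omega)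

theorem pv_notletter_cond (c : Char) (hc : pvIsLetter c = false) :
    ¬ ((65 ≤ ((c.toNat : Int)) ∧ ((c.toNat : Int)) ≤ 90) ∨
       (97 ≤ ((c.toNat : Int)) ∧ ((c.toNat : Int)) ≤ 122)) := by
  intro hcc
  rw [(pv_letter_iff c).mpr hcc] at hc
  exact absurd hc (by decide)

-- a maximal letter run under A's loop
theorem pv_aList_letters (q : List Char) (r : List Char) (n : Nat)
    (hq : ∀ c ∈ q, pvIsLetter c = true) :
    pvAList (q ++ r) (n : Int) = pvAlt n q ++ pvAList r ((n + q.length : Nat) : Int) := by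
  induction q generalizing n with
  | nil => simp [pvAlt]
  | cons c t ih =>
    have hc : pvIsLetter c = true := hq c (List.mem_cons_self)
    have hcond := (pv_letter_iff c).mp hc
    simp only [List.cons_append, pvAList, if_pos hcond, pvAlt]
    have h1 : ((n : Int) + 1) = ((n + 1 : Nat) : Int) := by push_cast; ring
    rw [h1, ih (n + 1) (fun x hx => hq x (List.mem_cons_of_mem _ hx))]
    have h2 : ((n + 1 + t.length : Nat) : Int) = ((n + (c :: t).length : Nat) : Int) := by
      simp; ring
    rw [h2]
    by_cases h : n % 2 = 0
    · rw [if_pos ((pv_mod_cast n).mpr h), if_pos h, pv_upper_eq c hc]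
    · rw [if_neg (fun hcc => h ((pv_mod_cast n).mp hcc)), if_neg h, pv_lower_eq c hc]

-- a run of non-letters copies itself and resets the counter
theorem pv_aList_nonletters (q : List Char) (r : List Char) (n : Int)
    (hq : ∀ c ∈ q, pvIsLetter c = false) :
    q ≠ [] → pvAList (q ++ r) n = q ++ pvAList r 0 := by
  induction q generalizing n with
  | nil => intro hne; exact absurd rfl hne
  | cons c t ih =>
    intro _
    have hc : pvIsLetter c = false := hq c (List.mem_cons_self)
    simp only [List.cons_append, pvAList, if_neg (pv_notletter_cond c hc)]
    cases t with
    | nil => simp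
    | cons d t' =>
      rw [ih 0 (fun x hx => hq x (List.mem_cons_of_mem _ hx)) (by simp)]

-- the counter is irrelevant when the next char is not a letter (or the list ends)
theorem pv_aList_reset (r : List Char) (m : Int)
    (hr : ∀ d, r.head? = some d → pvIsLetter d = false) :
    pvAList r m = pvAList r 0 := by
  cases r with
  | nil => rfl
  | cons d t =>
    simp only [pvAList, if_neg (pv_notletter_cond d (hr d rfl))]

theorem pv_main_aux (N : Nat) :
    ∀ l : List Char, l.length ≤ N → pvAList l 0 = (pvTokens l).flatten := by
  induction N with
  | zero =>
    intro l hl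
    have hnil : l = [] := List.eq_nil_of_length_eq_zero (Nat.le_zero.mp hl)
    subst hnil
    simp [pvTokens, pvAList]
  | succ N ihN =>
    intro l hl
    cases l with
    | nil => simp [pvTokens, pvAList]
    | cons c rest =>
      have hdrop_le :
          (List.dropWhile (fun x => pvIsLetter x == pvIsLetter c) (c :: rest)).length ≤ N := by
        rw [List.dropWhile_cons, if_pos (by simp)]
        have h1 := List.length_dropWhile_le (fun x => pvIsLetter x == pvIsLetter c) rest
        simp only [List.length_cons] at hl
        omega
      have ih := ihN _ hdrop_le
      have hsplit :
          List.takeWhile (fun x => pvIsLetter x == pvIsLetter c) (c :: rest)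
            ++ List.dropWhile (fun x => pvIsLetter x == pvIsLetter c) (c :: rest) = c :: rest :=
        List.takeWhile_append_dropWhile
      have hrun_ne :
          List.takeWhile (fun x => pvIsLetter x == pvIsLetter c) (c :: rest) ≠ [] := by
        simp
      have hmem : ∀ x ∈ List.takeWhile (fun x => pvIsLetter x == pvIsLetter c) (c :: rest),
          pvIsLetter x = pvIsLetter c := by
        intro x hx
        simpa using List.mem_takeWhile_imp hx
      have hrest'_head : ∀ d,
          (List.dropWhile (fun x => pvIsLetter x == pvIsLetter c) (c :: rest)).head? = some d →
          pvIsLetter d ≠ pvIsLetter c := by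
        intro d hd
        have h := List.head?_dropWhile_not (fun x => pvIsLetter x == pvIsLetter c) (c :: rest)
        rw [hd] at h
        simpa using h
      simp only [pvTokens, List.flatten_cons]
      rw [← ih]
      conv_lhs => rw [← hsplit]
      by_cases hL : pvIsLetter c = true
      · rw [if_pos hL]
        have h0 := pv_aList_letters
          (List.takeWhile (fun x => pvIsLetter x == pvIsLetter c) (c :: rest))
          (List.dropWhile (fun x => pvIsLetter x == pvIsLetter c) (c :: rest)) 0
          (fun x hx => by rw [hmem x hx, hL])
        simp only [Nat.cast_zero, Nat.zero_add] at h0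
        rw [h0, pv_transform_eq_alt]
        congr 1
        exact pv_aList_reset _ _ (fun d hd => by
          have := hrest'_head d hd
          rw [hL] at this
          cases h : pvIsLetter d
          · rfl
          · exact absurd h this)
      · have hLf : pvIsLetter c = false := by cases h : pvIsLetter c <;> simp_all
        rw [if_neg hL]
        exact pv_aList_nonletters _ _ 0 (fun x hx => by rw [hmem x hx, hLf]) hrun_ne

theorem pv_main (l : List Char) : pvAList l 0 = (pvTokens l).flatten :=
  pv_main_aux l.length l le_rfl

theorem pv_equal (s : String) : solution s = solution_alt s := by
  apply String.toList_inj.mp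
  have h := pv_foldA s.toList "" 0
  simp only [solution, solution_alt]
  rw [h]
  simp [pv_main]

-- ===== VERDICT (by name: the statement is the Claim_ definition above) =====
theorem solution_spec : Claim_equal_solution := by
  intro s _
  exact pv_equal s
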